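-- pv_equiv track=rewrite | github.com/ivanivanov12/Final_project_02.04.2025 | search_engine.py | find_documents
-- ===== SOURCE A (Python) =====
-- def split_words(text):
--     return text.lower().split()
--
-- def remove_stop_words(words, stop_words):
--     return [word for word in words if word not in stop_words]
--
-- def parse_query(query, stop_words):
--     words = split_words(query)
--     cleaned_words = remove_stop_words(words, stop_words)
--     return set(cleaned_words)
--
-- def match_document(document_words, query_words):
--     return len(set(document_words) & query_words)
--
-- def find_documents(documents, query, stop_words):
--     query_words = parse_query(query, stop_words)
--     results = []
--     for document_id, document_content in documents:
--         document_words = split_words(document_content)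
--         relevance = match_document(document_words, query_words)
--         if relevance > 0:
--             results.append((document_id, relevance))
--     results.sort(key=lambda x: x[1], reverse=True)
--     return results
-- ===== SOURCE B (Python) =====
-- def find_documents(documents, query, stop_words):
--     query_words = set(w for w in query.lower().split() if w not in stop_words)
--     # inverted index: word -> list of document positions containing it
--     index = {}
--     for pos, (_doc_id, content) in enumerate(documents):
--         for word in set(content.lower().split()):
--             index.setdefault(word, []).append(pos)
--     # relevance per document position = number of query words whose posting holds it
--     counts = {}
--     for word in query_words:
--         for pos in index.get(word, []):
--             counts[pos] = counts.get(pos, 0) + 1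
--     results = [(doc_id, counts[pos])
--                for pos, (doc_id, _content) in enumerate(documents)
--                if pos in counts]
--     return sorted(results, key=lambda x: x[1], reverse=True)
-- ===== Notes on version B (the rewrite author's own statement) =====
-- stated objective: alternative
-- what changed: Replaces A's per-document set intersections with an inverted index (word -> posting list of document positions) built in one pass, then a counting pass over the query words' postings, emitting results in original document order before the stable relevance sort.
import Mathlib
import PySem

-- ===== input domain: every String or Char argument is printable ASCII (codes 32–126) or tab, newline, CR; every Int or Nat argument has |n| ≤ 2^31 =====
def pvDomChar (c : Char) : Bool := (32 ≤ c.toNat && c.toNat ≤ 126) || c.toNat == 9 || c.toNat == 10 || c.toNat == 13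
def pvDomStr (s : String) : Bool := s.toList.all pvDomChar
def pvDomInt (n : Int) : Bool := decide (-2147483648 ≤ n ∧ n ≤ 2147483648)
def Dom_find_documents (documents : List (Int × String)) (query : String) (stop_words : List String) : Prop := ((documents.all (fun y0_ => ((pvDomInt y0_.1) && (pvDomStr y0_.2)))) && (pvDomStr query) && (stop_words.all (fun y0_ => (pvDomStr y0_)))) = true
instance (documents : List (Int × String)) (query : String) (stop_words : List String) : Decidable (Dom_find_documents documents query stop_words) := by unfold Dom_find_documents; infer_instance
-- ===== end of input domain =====

-- B replaces A's per-document set intersections by an inverted index of word → posting positions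
-- and one counting pass over the query words' postings (objective: alternative decomposition).

-- ===== PORT A =====
def split_words (text : String) : List String :=
  PySem.Str.split₀ (PySem.Str.lower text)

def remove_stop_words (words : List String) (stop_words : List String) : List String :=
  words.filter (fun word => !stop_words.contains word)

def parse_query (query : String) (stop_words : List String) : PySem.Set String :=
  PySem.Set.ofList (remove_stop_words (split_words query) stop_words)

def match_document (document_words : List String) (query_words : PySem.Set String) : Int :=
  PySem.Set.len (PySem.Set.inter (PySem.Set.ofList document_words) query_words)

def find_documents (documents : List (Int × String)) (query : String) (stop_words : List String) : List (Int × Int) :=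
  let query_words := parse_query query stop_words
  let results := documents.foldl (fun results p =>
      let document_words := split_words p.2
      let relevance := match_document document_words query_words
      if relevance > 0 then results ++ [(p.1, relevance)] else results) []
  PySem.List.sorted results (fun x => x.2) true

-- ===== PORT B =====
def find_documents_alt (documents : List (Int × String)) (query : String) (stop_words : List String) : List (Int × Int) :=
  let query_words : PySem.Set String :=
    PySem.Set.ofList ((PySem.Str.split₀ (PySem.Str.lower query)).filter (fun w => !stop_words.contains w))
  let index : PySem.Dict String (List Int) :=
    (PySem.List.enumerate documents).foldl (fun index p =>
      (PySem.Set.ofList (PySem.Str.split₀ (PySem.Str.lower p.2.2))).foldl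
        (fun index word => index.modify word [] (fun l => l ++ [p.1])) index)
      PySem.Dict.empty
  let counts : PySem.Dict Int Int :=
    query_words.foldl (fun counts word =>
      (index.getD word []).foldl (fun counts pos => counts.modify pos 0 (· + 1)) counts)
      PySem.Dict.empty
  let results := (PySem.List.enumerate documents).filterMap (fun p =>
      if counts.contains p.1 then some (p.2.1, counts.getD p.1 0) else none)
  PySem.List.sorted results (fun x => x.2) true

-- ===== PRECONDITION & SPEC =====
def Spec_find_documents (documents : List (Int × String)) (query : String) (stop_words : List String) (out : List (Int × Int)) : Prop := out = find_documents_alt documents query stop_words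
instance (documents : List (Int × String)) (query : String) (stop_words : List String) (out : List (Int × Int)) : Decidable (Spec_find_documents documents query stop_words out) := by unfold Spec_find_documents; infer_instance

-- ===== CLAIM (what is proved, stated in full; the proofs are below) =====
def Claim_equal_find_documents : Prop := ∀ (documents : List (Int × String)) (query : String) (stop_words : List String), Dom_find_documents documents query stop_words → Spec_find_documents documents query stop_words (find_documents documents query stop_words)

-- ===== LEMMAS AND PROOFS =====

-- a nested fold over g x is a fold over the flattened list
theorem pv_foldl_flatMap {α β γ : Type} (l : List α) (g : α → List β) (step : γ → β → γ) (init : γ) :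
    l.foldl (fun d x => (g x).foldl step d) init = (l.flatMap g).foldl step init := by
  induction l generalizing init with
  | nil => rfl
  | cons a t ih => simp [List.flatMap_cons, List.foldl_append, ih]

-- filtering a Nodup list for equality with w keeps at most the one w
theorem pv_filter_beq_of_nodup {α : Type} [DecidableEq α] (l : List α) (w : α) (h : l.Nodup) :
    l.filter (fun x => x == w) = if w ∈ l then [w] else [] := by
  induction l with
  | nil => simp
  | cons a t ih =>
    rcases List.nodup_cons.mp h with ⟨ha, ht⟩
    by_cases haw : a = w
    · subst haw
      simp [ih ht, ha]
    · simp [haw, ih ht, Ne.symm haw]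

-- (word, position) pairs contributed by the index-building loop, in append order
def pvPairs (documents : List (Int × String)) (s : Int) : List (String × Int) :=
  (PySem.List.enumerate documents s).flatMap
    (fun p => (PySem.Set.ofList (split_words p.2.2)).map (fun w => (w, p.1)))

-- the posting list of w: positions of documents containing w, in order
def pvPosting (documents : List (Int × String)) (s : Int) (w : String) : List Int :=
  (PySem.List.enumerate documents s).filterMap
    (fun p => if w ∈ split_words p.2.2 then some p.1 else none)

theorem pv_posting_cons (d : Int × String) (t : List (Int × String)) (s : Int) (w : String) :
    pvPosting (d :: t) s w
      = (if w ∈ split_words d.2 then [s] else []) ++ pvPosting t (s + 1) w := by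
  by_cases hw : w ∈ split_words d.2 <;>
    simp [pvPosting, PySem.List.enumerate_cons, hw]

theorem pv_pairs_head (c : String) (s : Int) (w : String) :
    (((PySem.Set.ofList (split_words c)).map (fun w' => (w', s))).filter
        (fun q => q.1 == w)).map (fun q => q.2)
      = if w ∈ split_words c then [s] else [] := by
  rw [List.filter_map]
  have hco : ((fun q : String × Int => q.1 == w) ∘ (fun w' => (w', s))) = (fun w' => w' == w) := rfl
  rw [hco, pv_filter_beq_of_nodup _ w (PySem.Set.nodup_ofList _)]
  by_cases hw : w ∈ split_words c
  · rw [if_pos ((PySem.Set.mem_ofList _ _).mpr hw), if_pos hw]; rfl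
  · rw [if_neg (fun h => hw ((PySem.Set.mem_ofList _ _).mp h)), if_neg hw]; rfl

theorem pv_pairs_filter (documents : List (Int × String)) (s : Int) (w : String) :
    ((pvPairs documents s).filter (fun q => q.1 == w)).map (fun q => q.2)
      = pvPosting documents s w := by
  induction documents generalizing s with
  | nil => simp [pvPairs, pvPosting, PySem.List.enumerate_nil]
  | cons d t ih =>
    rw [pv_posting_cons]
    simp only [pvPairs, PySem.List.enumerate_cons, List.flatMap_cons,
      List.filter_append, List.map_append]
    rw [pv_pairs_head]
    exact congrArg _ (ih (s + 1))

theorem pv_posting_lb (documents : List (Int × String)) (s : Int) (w : String) :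
    ∀ i ∈ pvPosting documents s w, s ≤ i := by
  induction documents generalizing s with
  | nil => simp [pvPosting, PySem.List.enumerate_nil]
  | cons d t ih =>
    intro i hi
    rw [pv_posting_cons] at hi
    rcases List.mem_append.mp hi with h | h
    · by_cases hw : w ∈ split_words d.2
      · rw [if_pos hw] at h; simp at h; omega
      · rw [if_neg hw] at h; simp at h
    · have := ih (s + 1) i h; omega

theorem pv_posting_count (documents : List (Int × String)) (s : Int) (w : String)
    (k : Nat) (hk : k < documents.length) :
    (pvPosting documents s w).count (s + (k : Int))
      = if w ∈ split_words (documents[k].2) then 1 else 0 := by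
  induction documents generalizing s k with
  | nil => simp at hk
  | cons d t ih =>
    rw [pv_posting_cons, List.count_append]
    cases k with
    | zero =>
      have htail : (pvPosting t (s + 1) w).count (s + ((0 : Nat) : Int)) = 0 := by
        rw [List.count_eq_zero]
        intro h
        have h2 := pv_posting_lb t (s + 1) w _ h
        omega
      rw [htail]
      by_cases hw : w ∈ split_words d.2 <;> simp [hw]
    | succ k' =>
      have hk' : k' < t.length := by simpa using Nat.lt_of_succ_lt_succ hk
      have hne : s ≠ s + ((k' + 1 : Nat) : Int) := by push_cast; omega
      have hhead0 : (if w ∈ split_words d.2 then [s] else []).count (s + ((k' + 1 : Nat) : Int)) = 0 := by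
        (by_cases hw : w ∈ split_words d.2 <;> simp [hw, List.count_cons]); omega
      have h1 : (s + ((k' + 1 : Nat) : Int)) = (s + 1) + (k' : Int) := by push_cast; ring
      rw [hhead0, h1, ih (s + 1) k' hk']
      simp

-- count over a flatMap is the sum of the per-piece counts
theorem pv_count_flatMap {α β : Type} [DecidableEq β] (l : List α) (g : α → List β) (x : β) :
    ((l.flatMap g).count x) = (l.map (fun a => (g a).count x)).sum := by
  induction l with
  | nil => simp
  | cons a t ih => simp [List.flatMap_cons, List.count_append, ih]

theorem pv_sum_indicator {α : Type} (l : List α) (p : α → Prop) [DecidablePred p] :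
    (l.map (fun a => if p a then 1 else 0)).sum = (l.filter (fun a => decide (p a))).length := by
  induction l with
  | nil => simp
  | cons a t ih =>
    by_cases hp : p a <;> simp [hp, ih, Nat.add_comm]

-- |s ∩ t| counts the elements of t lying in s, for Nodup s, t
theorem pv_inter_length {α : Type} [DecidableEq α] (s t : List α)
    (hs : s.Nodup) (ht : t.Nodup) :
    (PySem.Set.inter s t).length = (t.filter (fun w => decide (w ∈ s))).length := by
  have h1 : (PySem.Set.inter s t).Nodup := PySem.Set.nodup_inter s t hs
  have h2 : (t.filter (fun w => decide (w ∈ s))).Nodup := ht.filter _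
  have hperm : (PySem.Set.inter s t).Perm (t.filter (fun w => decide (w ∈ s))) := by
    rw [List.perm_ext_iff_of_nodup h1 h2]
    intro a
    simp [PySem.Set.mem_inter, List.mem_filter, and_comm]
  exact hperm.length_eq

-- B's relevance count at position k equals A's per-document intersection size
theorem pv_counts_spec (documents : List (Int × String)) (qw : List String) (hqw : qw.Nodup)
    (k : Nat) (hk : k < documents.length) :
    (((qw.flatMap (fun w => pvPosting documents 0 w)).count ((k : Int)) : Nat) : Int)
      = match_document (split_words documents[k].2) qw := by
  rw [pv_count_flatMap]
  have hmap : (qw.map (fun w => (pvPosting documents 0 w).count ((k : Int)))).sum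
      = (qw.map (fun w => if w ∈ split_words documents[k].2 then 1 else 0)).sum := by
    apply congrArg
    apply List.map_congr_left
    intro w _
    have h := pv_posting_count documents 0 w k hk
    simpa using h
  rw [hmap, pv_sum_indicator qw (fun w => w ∈ split_words documents[k].2)]
  unfold match_document
  rw [PySem.Set.len, pv_inter_length _ _ (PySem.Set.nodup_ofList _) hqw]
  simp [PySem.Set.mem_ofList]

-- A's append-if loop is a filterMap
theorem pv_resultsA (documents : List (Int × String)) (qw : PySem.Set String)
    (acc : List (Int × Int)) :
    documents.foldl (fun results p =>
        if match_document (split_words p.2) qw > 0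
        then results ++ [(p.1, match_document (split_words p.2) qw)] else results) acc
      = acc ++ documents.filterMap (fun p =>
          if match_document (split_words p.2) qw > 0
          then some (p.1, match_document (split_words p.2) qw) else none) := by
  induction documents generalizing acc with
  | nil => simp
  | cons d t ih =>
    by_cases h : match_document (split_words d.2) qw > 0 <;>
      simp [h, ih]

-- a filterMap over enumerate whose function ignores the index is a filterMap over the list
theorem pv_filterMap_enumerate {α β : Type} (l : List α) (s : Int) (h : α → Option β) :
    (PySem.List.enumerate l s).filterMap (fun p => h p.2) = l.filterMap h := by
  induction l generalizing s with
  | nil => simp [PySem.List.enumerate_nil]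
  | cons a t ih => simp [PySem.List.enumerate_cons, List.filterMap_cons, ih]

-- the index-building double loop builds exactly the fold over pvPairs
theorem pv_index_eq (documents : List (Int × String)) :
    (PySem.List.enumerate documents).foldl (fun index p =>
        (PySem.Set.ofList (PySem.Str.split₀ (PySem.Str.lower p.2.2))).foldl
          (fun index word => index.modify word [] (fun l => l ++ [p.1])) index)
      PySem.Dict.empty
      = (pvPairs documents 0).foldl
          (fun d q => d.modify q.1 [] (fun acc => acc ++ [q.2])) PySem.Dict.empty := by
  have hf : (fun (index : PySem.Dict String (List Int)) (p : Int × (Int × String)) =>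
      (PySem.Set.ofList (PySem.Str.split₀ (PySem.Str.lower p.2.2))).foldl
        (fun index word => index.modify word [] (fun l => l ++ [p.1])) index)
      = (fun (index : PySem.Dict String (List Int)) (p : Int × (Int × String)) =>
      ((PySem.Set.ofList (split_words p.2.2)).map (fun w => (w, p.1))).foldl
        (fun d q => d.modify q.1 [] (fun acc => acc ++ [q.2])) index) := by
    funext index p
    rw [List.foldl_map]
    rfl
  rw [hf]
  unfold pvPairs
  exact pv_foldl_flatMap _ _ _ _

theorem pv_index_getD (documents : List (Int × String)) (w : String) :
    ((pvPairs documents 0).foldl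
        (fun d q => d.modify q.1 [] (fun acc => acc ++ [q.2])) PySem.Dict.empty).getD w []
      = pvPosting documents 0 w := by
  rw [PySem.Dict.getD_foldl_modify_append, PySem.Dict.getD_empty, List.nil_append]
  exact pv_pairs_filter documents 0 w

-- the counting loop over the query words is Counter of the flattened postings
theorem pv_counts_eq (index : PySem.Dict String (List Int)) (qw : List String)
    (posting : String → List Int) (h : ∀ w, index.getD w [] = posting w) :
    qw.foldl (fun counts word =>
        (index.getD word []).foldl (fun counts pos => counts.modify pos 0 (· + 1)) counts)
      PySem.Dict.empty
      = PySem.Dict.counter (qw.flatMap posting) := by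
  rw [PySem.Dict.counter_eq_foldl, ← pv_foldl_flatMap]
  have hf : (fun (counts : PySem.Dict Int Int) word =>
      (index.getD word []).foldl (fun counts pos => counts.modify pos 0 (· + 1)) counts)
      = (fun (counts : PySem.Dict Int Int) word =>
      (posting word).foldl (fun counts pos => counts.modify pos 0 (· + 1)) counts) := by
    funext counts word
    rw [h]
  rw [hf]

-- the output comprehension, given the counter, equals A's per-document filterMap
theorem pv_resultsB (documents : List (Int × String)) (qw : List String) (hqw : qw.Nodup) :
    (PySem.List.enumerate documents).filterMap (fun p =>
        if (PySem.Dict.counter (qw.flatMap (fun w => pvPosting documents 0 w))).contains p.1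
        then some (p.2.1, (PySem.Dict.counter (qw.flatMap (fun w => pvPosting documents 0 w))).getD p.1 0)
        else none)
      = documents.filterMap (fun p =>
          if match_document (split_words p.2) qw > 0
          then some (p.1, match_document (split_words p.2) qw) else none) := by
  rw [← pv_filterMap_enumerate documents 0 (fun d =>
    if match_document (split_words d.2) qw > 0
    then some (d.1, match_document (split_words d.2) qw) else none)]
  apply List.filterMap_congr
  intro p hp
  rcases (PySem.List.mem_enumerate_iff documents 0 p).mp hp with ⟨k, hk, hpk⟩
  subst hpk
  simp only [zero_add]
  have hcount := pv_counts_spec documents qw hqw k hk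
  rw [PySem.Dict.contains_counter, PySem.Dict.getD_counter, List.contains_eq_mem]
  by_cases hm : match_document (split_words documents[k].2) qw > 0
  · have hmem : (k : Int) ∈ qw.flatMap (fun w => pvPosting documents 0 w) := by
      rw [← List.count_pos_iff]
      omega
    rw [if_pos (by simp [hmem]), if_pos hm, hcount]
  · have hnmem : (k : Int) ∉ qw.flatMap (fun w => pvPosting documents 0 w) := by
      intro hmem
      have := List.count_pos_iff.mpr hmem
      omega
    rw [if_neg (by simp [hnmem]), if_neg hm]

-- ===== VERDICT (by name: the statement is the Claim_ definition above) =====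
theorem find_documents_spec : Claim_equal_find_documents := by
  unfold Claim_equal_find_documents
  intro documents query stop_words _
  unfold Spec_find_documents
  simp only [find_documents, find_documents_alt]
  have hq : PySem.Set.ofList ((PySem.Str.split₀ (PySem.Str.lower query)).filter
      (fun w => !stop_words.contains w)) = parse_query query stop_words := rfl
  rw [hq]
  have hnd : (parse_query query stop_words).Nodup := by
    unfold parse_query
    exact PySem.Set.nodup_ofList _
  rw [pv_index_eq documents]
  rw [pv_counts_eq _ _ (fun w => pvPosting documents 0 w) (pv_index_getD documents)]
  rw [pv_resultsB documents (parse_query query stop_words) hnd]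
  rw [pv_resultsA]
  rw [List.nil_append]
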